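-- pv_equiv track=rewrite | github.com/gjzim/leetcode | 1769. Minimum Number of Operations to Move All Balls to Each Box/solution.py | minOperations_bf
-- ===== SOURCE A (Python) =====
-- from typing import List
--
-- def minOperations_bf(boxes: str) -> List[int]:
--     n = len(boxes)
--     result = [0] * n
--
--     for i, c in enumerate(boxes):
--         if c == '0':
--             continue
--
--         for j in range(n):
--             result[j] += abs(j - i)
--
--     return result
-- ===== SOURCE B (Python) =====
-- from typing import List
--
-- def minOperations_bf(boxes: str) -> List[int]:
--     def sweep(s):
--         out = []
--         cnt = ops = 0
--         for c in s:
--             out.append(ops)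
--             cnt += c != '0'
--             ops += cnt
--         return out
--     left = sweep(boxes)
--     right = sweep(boxes[::-1])[::-1]
--     return [l + r for l, r in zip(left, right)]
-- ===== Notes on version B (the rewrite author's own statement) =====
-- stated objective: faster
-- what changed: Replaced the per-ball O(n) distance-accumulation inner loop with two linear prefix-sum sweeps (running ball count and running cost from the left, then from the right), combined position-wise.
import Mathlib
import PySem

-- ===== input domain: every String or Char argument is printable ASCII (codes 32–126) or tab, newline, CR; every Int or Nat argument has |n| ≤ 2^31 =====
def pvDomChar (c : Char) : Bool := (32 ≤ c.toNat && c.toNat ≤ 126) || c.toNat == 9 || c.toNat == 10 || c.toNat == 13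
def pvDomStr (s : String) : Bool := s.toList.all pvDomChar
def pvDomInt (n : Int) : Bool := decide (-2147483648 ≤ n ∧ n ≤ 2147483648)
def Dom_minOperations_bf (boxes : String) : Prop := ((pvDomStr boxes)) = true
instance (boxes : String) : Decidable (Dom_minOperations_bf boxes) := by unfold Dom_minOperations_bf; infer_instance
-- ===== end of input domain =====

-- B replaces A's quadratic per-ball distance accumulation with two linear prefix-sum sweeps
-- (count and running cost from the left, then from the right): objective faster, O(n) vs O(n^2).

-- ===== PORT A =====
-- literal port of Source A: result = [0]*n; for i, c in enumerate(boxes): if c == '0': continue;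
-- for j in range(n): result[j] += abs(j - i)
def minOperations_bf (boxes : String) : List Int :=
  let n : Int := (boxes.toList.length : Int)
  let result : List Int := List.replicate boxes.toList.length (0 : Int)
  (PySem.List.enumerate boxes.toList 0).foldl
    (fun result ic =>
      if ic.2 = '0' then result
      else (PySem.List.pyRange 0 n 1).foldl
        (fun res j => res.modify j.toNat (fun x => x + |j - ic.1|)) result)
    result

-- ===== PORT B =====
-- port of Source B's sweep: out = []; cnt = ops = 0; for c in s: out.append(ops); cnt += c != '0'; ops += cnt
def pvSweep (s : List Char) : List Int :=
  (s.foldl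
    (fun (st : List Int × Int × Int) c =>
      let cnt := st.2.1 + (if c ≠ '0' then 1 else 0)
      (st.1 ++ [st.2.2], cnt, st.2.2 + cnt))
    ([], 0, 0)).1

-- boxes[::-1] is the reversed character sequence (PySem.Str.slice?_none_none_neg_one)
def minOperations_bf_alt (boxes : String) : List Int :=
  let left := pvSweep boxes.toList
  let right := (pvSweep boxes.toList.reverse).reverse
  List.zipWith (· + ·) left right

-- ===== PRECONDITION & SPEC =====
def Spec_minOperations_bf (boxes : String) (out : List Int) : Prop := out = minOperations_bf_alt boxes
instance (boxes : String) (out : List Int) : Decidable (Spec_minOperations_bf boxes out) := by unfold Spec_minOperations_bf; infer_instance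

-- ===== CLAIM (what is proved, stated in full; the proofs are below) =====
def Claim_equal_minOperations_bf : Prop := ∀ (boxes : String), Dom_minOperations_bf boxes → Spec_minOperations_bf boxes (minOperations_bf boxes)

-- ===== LEMMAS AND PROOFS =====

-- ball weight of one character: 1 if it holds a ball (≠ '0'), else 0
def pvB (c : Char) : Int := if c = '0' then 0 else 1

-- cost at position j of the balls strictly left of j (cons-structured recursion)
def pvL : List Char → Nat → Int
  | _, 0 => 0
  | [], _ + 1 => 0
  | c :: cs, j + 1 => pvB c * (j + 1) + pvL cs j

-- cons-structured version of pvSweep's loop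
def pvSweepF : List Char → Int → Int → List Int
  | [], _, _ => []
  | c :: cs, cnt, ops => ops :: pvSweepF cs (cnt + pvB c) (ops + cnt + pvB c)

theorem pvSweep_loop (s : List Char) (out : List Int) (cnt ops : Int) :
    (s.foldl
      (fun (st : List Int × Int × Int) c =>
        let cnt := st.2.1 + (if c ≠ '0' then 1 else 0)
        (st.1 ++ [st.2.2], cnt, st.2.2 + cnt))
      (out, cnt, ops)).1 = out ++ pvSweepF s cnt ops := by
  induction s generalizing out cnt ops with
  | nil => simp [pvSweepF]
  | cons c cs ih =>
      simp only [List.foldl_cons]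
      rw [ih]
      by_cases h : c = '0' <;> simp [pvSweepF, pvB, h, add_assoc]

theorem pvSweep_eq (s : List Char) : pvSweep s = pvSweepF s 0 0 := by
  unfold pvSweep
  rw [pvSweep_loop]
  simp

theorem length_pvSweepF (s : List Char) (cnt ops : Int) :
    (pvSweepF s cnt ops).length = s.length := by
  induction s generalizing cnt ops with
  | nil => simp [pvSweepF]
  | cons c cs ih => simp [pvSweepF, ih]

theorem pvSweepF_get (s : List Char) (cnt ops : Int) (j : Nat) (hj : j < s.length) :
    (pvSweepF s cnt ops)[j]'(by rw [length_pvSweepF]; exact hj) =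
      ops + cnt * j + pvL s j := by
  induction s generalizing cnt ops j with
  | nil => simp at hj
  | cons c cs ih =>
      cases j with
      | zero => simp [pvSweepF, pvL]
      | succ j =>
          have hj' : j < cs.length := by simpa using hj
          simp only [pvSweepF, List.getElem_cons_succ, pvL]
          rw [ih _ _ _ hj']
          push_cast
          ring

-- pvL as a sum over all indices (out-of-range positions read '0' and contribute 0)
theorem pvL_sum (s : List Char) (j : Nat) :
    pvL s j = ∑ i ∈ Finset.range s.length, pvB (s.getD i '0') * max ((j : Int) - i) 0 := by
  induction s generalizing j with
  | nil => cases j <;> simp [pvL]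
  | cons c cs ih =>
      cases j with
      | zero =>
          simp only [pvL, List.length_cons]
          rw [Finset.sum_range_succ']
          have h1 : ∀ i ∈ Finset.range cs.length,
              pvB ((c :: cs).getD (i+1) '0') * max ((((0:Nat)):Int) - ((i+1:Nat):Int)) 0 = 0 := by
            intro i _
            have hm : max ((((0:Nat)):Int) - ((i+1:Nat):Int)) 0 = 0 := by
              apply max_eq_right; push_cast; omega
            rw [hm, mul_zero]
          rw [Finset.sum_eq_zero h1]
          simp
      | succ j =>
          simp only [pvL, List.length_cons]
          rw [Finset.sum_range_succ']
          have h2 : ∀ i ∈ Finset.range cs.length,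
              pvB ((c :: cs).getD (i+1) '0') * max (((j+1 : Nat) : Int) - ((i+1 : Nat) : Int)) 0
              = pvB (cs.getD i '0') * max ((j : Int) - i) 0 := by
            intro i _
            simp
          rw [Finset.sum_congr rfl h2, ih]
          have hm : max (((j+1 : Nat) : Int) - ((0:Nat):Int)) 0 = ((j : Int) + 1) := by
            apply max_eq_left; push_cast; omega
          rw [hm]
          simp only [List.getD_cons_zero]
          ring

-- A's contribution to position k of the suffix of balls starting at Python index i0
def pvAcost : List Char → Int → Int → Int
  | [], _, _ => 0
  | c :: cs, i0, k => pvB c * |k - i0| + pvAcost cs (i0 + 1) k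

theorem pvAcost_sum (s : List Char) (i0 k : Int) :
    pvAcost s i0 k = ∑ i ∈ Finset.range s.length, pvB (s.getD i '0') * |k - (i0 + i)| := by
  induction s generalizing i0 with
  | nil => simp [pvAcost]
  | cons c cs ih =>
      simp only [pvAcost, List.length_cons]
      rw [Finset.sum_range_succ', ih]
      have : ∀ i ∈ Finset.range cs.length,
          pvB ((c :: cs).getD (i+1) '0') * |k - (i0 + (i+1:Nat))| =
          pvB (cs.getD i '0') * |k - (i0 + 1 + i)| := by
        intro i _
        have : k - (i0 + ((i:Int)+1)) = k - (i0 + 1 + i) := by ring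
        push_cast
        rw [this]
        simp
      rw [Finset.sum_congr rfl this]
      simp [add_comm]

-- the inner 'for j in range(n): result[j] += |j - i|' loop, element-wise
theorem fold_modify_length (g : Int → Int → Int) (m : Nat) (res : List Int) :
    ((PySem.List.pyRange 0 (m : Int) 1).foldl
      (fun r j => r.modify j.toNat (g j)) res).length = res.length := by
  induction m generalizing res with
  | zero => simp
  | succ m ih =>
      rw [show ((m+1 : Nat) : Int) = (m : Int) + 1 by push_cast; ring,
        PySem.List.pyRange_one_succ_right (by positivity)]
      simp [List.foldl_append, ih]

theorem fold_modify_get (g : Int → Int → Int) (m : Nat) (res : List Int) (k : Nat) :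
    ((PySem.List.pyRange 0 (m : Int) 1).foldl
      (fun r j => r.modify j.toNat (g j)) res)[k]? =
    (res[k]?).map (fun x => if k < m then g k x else x) := by
  induction m generalizing res with
  | zero => simp [Option.map_id']
  | succ m ih =>
      rw [show ((m+1 : Nat) : Int) = (m : Int) + 1 by push_cast; ring,
        PySem.List.pyRange_one_succ_right (by positivity)]
      simp only [List.foldl_append, List.foldl_cons, List.foldl_nil]
      rw [List.getElem?_modify, ih]
      rcases res[k]? with _ | x
      · simp
      · simp only [Option.map_some]
        by_cases hk : k = m
        · subst hk
          simp [Int.toNat_natCast]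
        · have : ((m:Int).toNat = k) = False := by
            simp [Int.toNat_natCast]; omega
          by_cases h1 : k < m <;> simp_all <;> omega

-- A's outer loop over the enumerated balls preserves length
theorem outer_fold_length (s : List Char) (n : Int) (i0 : Int) (res : List Int)
    (hn : n = (res.length : Int)) :
    ((PySem.List.enumerate s i0).foldl
      (fun result ic =>
        if ic.2 = '0' then result
        else (PySem.List.pyRange 0 n 1).foldl
          (fun r j => r.modify j.toNat (fun x => x + |j - ic.1|)) result)
      res).length = res.length := by
  induction s generalizing i0 res with
  | nil => simp [PySem.List.enumerate_nil]
  | cons c cs ih =>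
      rw [PySem.List.enumerate_cons]
      simp only [List.foldl_cons]
      by_cases hc : c = '0'
      · rw [if_pos (by simpa using hc), ih _ _ hn]
      · rw [if_neg (by simpa using hc)]
        subst hn
        rw [ih _ _ (by rw [fold_modify_length]),
          fold_modify_length]

-- A's outer loop over the enumerated balls, element-wise
theorem outer_fold_get (s : List Char) (n : Int) (i0 : Int) (res : List Int)
    (hn : n = (res.length : Int)) (k : Nat) :
    ((PySem.List.enumerate s i0).foldl
      (fun result ic =>
        if ic.2 = '0' then result
        else (PySem.List.pyRange 0 n 1).foldl
          (fun r j => r.modify j.toNat (fun x => x + |j - ic.1|)) result)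
      res)[k]? =
    (res[k]?).map (fun x => if k < res.length then x + pvAcost s i0 k else x) := by
  induction s generalizing i0 res with
  | nil =>
      rw [PySem.List.enumerate_nil]
      simp only [List.foldl_nil, pvAcost]
      cases res[k]? <;> simp
  | cons c cs ih =>
      rw [PySem.List.enumerate_cons]
      simp only [List.foldl_cons]
      by_cases hc : c = '0'
      · rw [if_pos (by simpa using hc), ih _ _ hn]
        have hA : pvAcost (c :: cs) i0 k = pvAcost cs (i0 + 1) k := by
          simp [pvAcost, pvB, hc]
        rw [hA]
      · rw [if_neg (by simpa using hc)]
        subst hn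
        rw [ih _ _ (by rw [fold_modify_length])]
        rw [fold_modify_get (fun j x => x + |j - i0|) res.length res k,
          fold_modify_length]
        rcases res[k]? with _ | x
        · simp
        · simp only [Option.map_some]
          by_cases hk : k < res.length <;> simp [hk, pvAcost, pvB, hc]
          ring

-- cost split at position k: balls to the left and balls to the right
theorem pv_split (cs : List Char) (k : Nat) (hk : k < cs.length) :
    pvAcost cs 0 k = pvL cs k + pvL cs.reverse (cs.length - 1 - k) := by
  rw [pvAcost_sum, pvL_sum, pvL_sum, List.length_reverse]
  rw [← Finset.sum_range_reflect
    (fun i => pvB (cs.reverse.getD i '0') * max ((↑(cs.length - 1 - k) : Int) - i) 0) cs.length]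
  rw [← Finset.sum_add_distrib]
  apply Finset.sum_congr rfl
  intro i hi
  rw [Finset.mem_range] at hi
  have hrev : cs.reverse.getD (cs.length - 1 - i) '0' = cs.getD i '0' := by
    have h1 : cs.length - 1 - i < cs.length := by omega
    rw [List.getD_eq_getElem?_getD, List.getD_eq_getElem?_getD,
      List.getElem?_reverse (by simpa using h1)]
    congr 2
    omega
  rw [hrev, ← mul_add]
  congr 1
  have h1 : ((cs.length - 1 - k : Nat) : Int) = (cs.length : Int) - 1 - k := by omega
  have h2 : ((cs.length - 1 - i : Nat) : Int) = (cs.length : Int) - 1 - i := by omega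
  rw [h1, h2]
  rcases le_total ((k : Int)) i with h | h
  · rw [abs_of_nonpos (by omega), max_eq_right (by omega), max_eq_left (by omega)]
    ring
  · rw [abs_of_nonneg (by omega), max_eq_left (by omega), max_eq_right (by omega)]
    ring

theorem minOperations_bf_len (boxes : String) :
    (minOperations_bf boxes).length = boxes.toList.length := by
  unfold minOperations_bf
  rw [outer_fold_length _ _ _ _ (by simp)]
  simp

theorem minOperations_bf_get (boxes : String) (k : Nat) (hk : k < boxes.toList.length) :
    (minOperations_bf boxes)[k]? = some (pvAcost boxes.toList 0 k) := by
  unfold minOperations_bf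
  rw [outer_fold_get _ _ _ _ (by simp) k]
  have hk' : k < boxes.length := by simpa using hk
  simp [hk']

theorem minOperations_bf_alt_len (boxes : String) :
    (minOperations_bf_alt boxes).length = boxes.toList.length := by
  unfold minOperations_bf_alt
  simp [pvSweep_eq, length_pvSweepF]

theorem minOperations_bf_alt_get (boxes : String) (k : Nat) (hk : k < boxes.toList.length) :
    (minOperations_bf_alt boxes)[k]'(by rw [minOperations_bf_alt_len]; exact hk) =
      pvL boxes.toList k + pvL boxes.toList.reverse (boxes.toList.length - 1 - k) := by
  unfold minOperations_bf_alt
  simp only [pvSweep_eq]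
  rw [List.getElem_zipWith]
  have hrlen : (pvSweepF boxes.toList.reverse 0 0).reverse.length = boxes.toList.length := by
    simp [length_pvSweepF]
  have hrev : (pvSweepF boxes.toList.reverse 0 0).reverse[k]'(by rw [hrlen]; exact hk) =
      (pvSweepF boxes.toList.reverse 0 0)[boxes.toList.length - 1 - k]'
        (by rw [length_pvSweepF, List.length_reverse]; omega) := by
    rw [List.getElem_reverse]
    congr 1
    simp [length_pvSweepF]
  rw [hrev, pvSweepF_get _ _ _ k hk,
    pvSweepF_get _ _ _ (boxes.toList.length - 1 - k) (by rw [List.length_reverse]; omega)]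
  ring

-- ===== VERDICT (by name: the statement is the Claim_ definition above) =====
theorem minOperations_bf_spec : Claim_equal_minOperations_bf := by
  intro boxes _
  unfold Spec_minOperations_bf
  apply List.ext_getElem
  · rw [minOperations_bf_len, minOperations_bf_alt_len]
  · intro k h1 h2
    have hk : k < boxes.toList.length := by rw [minOperations_bf_len] at h1; exact h1
    have hA : (minOperations_bf boxes)[k] = pvAcost boxes.toList 0 k := by
      have := minOperations_bf_get boxes k hk
      rw [List.getElem?_eq_getElem h1] at this
      exact Option.some_injective _ this
    rw [hA, minOperations_bf_alt_get boxes k hk, pv_split boxes.toList k hk]
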